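-- pv_equiv track=rewrite | github.com/Aadi189/brewcode-brainwave- | backend/app/tools/sentiment_analyzer_tool.py | _detect_coordination
-- ===== SOURCE A (Python) =====
-- from typing import List, Dict, Any, Optional
--
-- def _detect_coordination(texts: List[str]) -> bool:
--     """Detect coordinated narrative across articles"""
--     if len(texts) < 3:
--         return False
--
--     # Extract common words (excluding stop words)
--     stop_words = {
--         "the",
--         "a",
--         "an",
--         "and",
--         "or",
--         "but",
--         "in",
--         "on",
--         "at",
--         "to",
--         "for",
--     }
--
--     word_sets = []
--     for text in texts:
--         words = set(text.lower().split())
--         words = {w for w in words if len(w) > 4 and w not in stop_words}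
--         word_sets.append(words)
--
--     # Find common words across all texts
--     if word_sets:
--         common_words = set.intersection(*word_sets)
--
--         # If >3 significant common words, likely coordinated
--         if len(common_words) > 3:
--             return True
--
--     return False
-- ===== SOURCE B (Python) =====
-- def _detect_coordination(texts):
--     """Detect coordinated narrative across articles"""
--     if len(texts) < 3:
--         return False
--
--     stop_words = {
--         "the", "a", "an", "and", "or", "but", "in", "on", "at", "to", "for",
--     }
--
--     # Document-frequency index: word -> number of texts whose significant
--     # word set contains it (each text contributes at most 1 per word).
--     df = {}
--     for text in texts:
--         for w in set(text.lower().split()):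
--             if len(w) > 4 and w not in stop_words:
--                 df[w] = df.get(w, 0) + 1
--
--     # Words common to all texts are exactly those with full document frequency.
--     n = len(texts)
--     common_count = sum(1 for c in df.values() if c == n)
--     return common_count > 3
-- ===== Notes on version B (the rewrite author's own statement) =====
-- stated objective: alternative
-- what changed: Replaces the list-of-word-sets plus n-way set.intersection with a single accumulated document-frequency dict; words common to all texts are read off as entries whose count equals len(texts).
import Mathlib
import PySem

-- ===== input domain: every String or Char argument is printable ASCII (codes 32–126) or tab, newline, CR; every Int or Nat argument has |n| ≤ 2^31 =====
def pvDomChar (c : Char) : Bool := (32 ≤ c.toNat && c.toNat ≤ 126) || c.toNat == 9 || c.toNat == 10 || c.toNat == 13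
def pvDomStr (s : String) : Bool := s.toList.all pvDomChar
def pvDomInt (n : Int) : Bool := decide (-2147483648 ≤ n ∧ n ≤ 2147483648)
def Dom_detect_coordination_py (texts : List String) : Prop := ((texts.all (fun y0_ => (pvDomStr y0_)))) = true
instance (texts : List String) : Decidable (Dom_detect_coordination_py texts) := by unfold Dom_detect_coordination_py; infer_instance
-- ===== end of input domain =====

-- B replaces A's list of per-text word sets + n-way set intersection by one accumulated
-- document-frequency dict scanned once (alternative decomposition; return value proved equal).


-- ===== PORT A =====
-- stop_words (identical literal in both Pythons)
def pvStopWords : List String :=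
  ["the", "a", "an", "and", "or", "but", "in", "on", "at", "to", "for"]

-- the per-text extraction '{w for w in set(text.lower().split()) if len(w) > 4 and w not in stop_words}',
-- written identically in both Pythons
def pvSigWords (text : String) : PySem.Set String :=
  (PySem.Set.ofList (PySem.Str.split₀ (PySem.Str.lower text))).filter
    (fun w => decide (4 < PySem.Str.len w) && !(pvStopWords.contains w))

def detect_coordination_py (texts : List String) : Bool :=
  if texts.length < 3 then false
  else
    -- word_sets = []; for text in texts: ... word_sets.append(words)
    let word_sets : List (PySem.Set String) :=
      texts.foldl (fun acc text => acc ++ [pvSigWords text]) []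
    -- if word_sets: common_words = set.intersection(*word_sets); if len > 3: return True
    match word_sets with
    | [] => false
    | s :: rest =>
      let common_words := rest.foldl (fun acc t => PySem.Set.inter acc t) s
      if 3 < common_words.length then true else false

-- ===== PORT B =====
def detect_coordination_py_alt (texts : List String) : Bool :=
  if texts.length < 3 then false
  else
    -- df = {}; for text in texts: for w in sig(text): df[w] = df.get(w, 0) + 1
    let df : PySem.Dict String Int :=
      texts.foldl
        (fun d text => (pvSigWords text).foldl (fun d w => d.insert w (d.getD w 0 + 1)) d)
        PySem.Dict.empty
    let n : Int := (texts.length : Int)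
    -- common_count = sum(1 for c in df.values() if c == n); return common_count > 3
    decide (3 < ((df.values.filter (fun c => c == n)).length : Int))

-- ===== PRECONDITION & SPEC =====
def Spec_detect_coordination_py (texts : List String) (out : Bool) : Prop := out = detect_coordination_py_alt texts
instance (texts : List String) (out : Bool) : Decidable (Spec_detect_coordination_py texts out) := by unfold Spec_detect_coordination_py; infer_instance

-- ===== CLAIM (what is proved, stated in full; the proofs are below) =====
def Claim_equal_detect_coordination_py : Prop := ∀ (texts : List String), Dom_detect_coordination_py texts → Spec_detect_coordination_py texts (detect_coordination_py texts)

-- ===== LEMMAS AND PROOFS =====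

theorem pv_sig_nodup (t : String) : (pvSigWords t).Nodup :=
  (PySem.Set.nodup_ofList _).filter _

-- document frequency computed by B's dict fold = number of texts whose significant set has w
theorem pv_df_getD (texts : List String) (d : PySem.Dict String Int) (w : String) :
    ((texts.foldl
        (fun d text => (pvSigWords text).foldl (fun d w => d.insert w (d.getD w 0 + 1)) d)
        d).getD w 0)
      = d.getD w 0 + (texts.countP (fun t => decide (w ∈ pvSigWords t)) : Int) := by
  induction texts generalizing d with
  | nil => simp
  | cons t ts ih =>
    rw [List.foldl_cons, ih, PySem.Dict.getD_foldl_insert_add_one, List.countP_cons]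
    by_cases hw : w ∈ pvSigWords t
    · rw [List.count_eq_one_of_mem (pv_sig_nodup t) hw]
      simp [hw]; ring
    · rw [List.count_eq_zero_of_not_mem hw]
      simp [hw]

-- the keys of B's dict stay nodup
theorem pv_df_keys_nodup (texts : List String) (d : PySem.Dict String Int) (h : d.keys.Nodup) :
    ((texts.foldl
        (fun d text => (pvSigWords text).foldl (fun d w => d.insert w (d.getD w 0 + 1)) d)
        d).keys).Nodup := by
  induction texts generalizing d with
  | nil => exact h
  | cons t ts ih =>
    exact ih _ (PySem.Dict.nodup_keys_foldl_insert _ _ _ h)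

-- the keys of B's dict are exactly the words significant in some text (plus the start keys)
theorem pv_df_mem_keys (texts : List String) (d : PySem.Dict String Int) (w : String) :
    (w ∈ (texts.foldl
        (fun d text => (pvSigWords text).foldl (fun d w => d.insert w (d.getD w 0 + 1)) d)
        d).keys) ↔ (w ∈ d.keys ∨ ∃ t ∈ texts, w ∈ pvSigWords t) := by
  induction texts generalizing d with
  | nil => simp
  | cons t ts ih =>
    rw [List.foldl_cons, ih, PySem.Dict.keys_foldl_insert, PySem.Set.mem_update]
    simp only [List.mem_cons]
    constructor
    · rintro (h | h)
      · rcases h with h | h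
        · exact Or.inl h
        · exact Or.inr ⟨t, Or.inl rfl, h⟩
      · rcases h with ⟨t', ht', hw⟩
        exact Or.inr ⟨t', Or.inr ht', hw⟩
    · rintro (h | ⟨t', ht', hw⟩)
      · exact Or.inl (Or.inl h)
      · rcases ht' with rfl | ht'
        · exact Or.inl (Or.inr hw)
        · exact Or.inr ⟨t', ht', hw⟩

-- A's running intersection: nodup, and membership = membership in every set
theorem pv_inter_nodup (rest : List (PySem.Set String)) (s : PySem.Set String) (h : s.Nodup) :
    (rest.foldl (fun acc t => PySem.Set.inter acc t) s).Nodup := by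
  induction rest generalizing s with
  | nil => exact h
  | cons r rs ih => exact ih _ (PySem.Set.nodup_inter _ _ h)

theorem pv_inter_mem (rest : List (PySem.Set String)) (s : PySem.Set String) (w : String) :
    w ∈ rest.foldl (fun acc t => PySem.Set.inter acc t) s ↔ (w ∈ s ∧ ∀ t ∈ rest, w ∈ t) := by
  induction rest generalizing s with
  | nil => simp
  | cons r rs ih =>
    rw [List.foldl_cons, ih, PySem.Set.mem_inter]
    constructor
    · rintro ⟨⟨hs, hr⟩, hrs⟩
      refine ⟨hs, ?_⟩
      intro t ht
      rcases List.mem_cons.mp ht with rfl | ht'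
      · exact hr
      · exact hrs t ht'
    · rintro ⟨hs, hall⟩
      exact ⟨⟨hs, hall r (List.mem_cons_self)⟩, fun t ht => hall t (List.mem_cons_of_mem _ ht)⟩

-- the central length equality: |intersection of all sig sets| = |df entries with full count|
theorem pv_len_eq (t : String) (rest : List String) :
    ((rest.map pvSigWords).foldl (fun acc s => PySem.Set.inter acc s) (pvSigWords t)).length
      = ((((t :: rest).foldl
            (fun d text => (pvSigWords text).foldl (fun d w => d.insert w (d.getD w 0 + 1)) d)
            PySem.Dict.empty).values.filter
          (fun c => c == ((t :: rest).length : Int))).length) := by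
  set texts := t :: rest with htexts
  set df : PySem.Dict String Int := texts.foldl
      (fun d text => (pvSigWords text).foldl (fun d w => d.insert w (d.getD w 0 + 1)) d)
      PySem.Dict.empty with hdf
  have hkn : df.keys.Nodup := pv_df_keys_nodup texts _ (by simp [PySem.Dict.keys_empty])
  rw [PySem.Dict.values_eq_map_keys df hkn 0, List.filter_map, List.length_map]
  -- both lists are nodup with the same membership: 'w significant in every text'
  have hP : ∀ w, (w ∈ df.keys.filter (fun k => (fun c => c == ((texts.length : Nat) : Int)) (df.getD k 0)))
      ↔ (w ∈ pvSigWords t ∧ ∀ t' ∈ rest, w ∈ pvSigWords t') := by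
    intro w
    rw [List.mem_filter]
    have hg : df.getD w 0 = (texts.countP (fun t' => decide (w ∈ pvSigWords t')) : Int) := by
      rw [hdf, pv_df_getD]; simp
    constructor
    · rintro ⟨hk, hq⟩
      simp only [hg, beq_iff_eq, Int.natCast_inj] at hq
      have hall := List.countP_eq_length.mp hq
      have h1 := hall t (by simp [htexts])
      simp only [decide_eq_true_eq] at h1
      refine ⟨h1, fun t' ht' => ?_⟩
      have := hall t' (by simp [htexts, ht'])
      simpa using this
    · rintro ⟨h1, h2⟩
      have hall : ∀ t' ∈ texts, decide (w ∈ pvSigWords t') = true := by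
        rintro t' ht'
        rcases List.mem_cons.mp ht' with rfl | ht'
        · simpa using h1
        · simpa using h2 t' ht'
      refine ⟨?_, ?_⟩
      · rw [hdf, pv_df_mem_keys]
        exact Or.inr ⟨t, by simp [htexts], h1⟩
      · simp only [hg, beq_iff_eq, Int.natCast_inj]
        exact List.countP_eq_length.mpr hall
  have hI : ∀ w, (w ∈ (rest.map pvSigWords).foldl (fun acc s => PySem.Set.inter acc s) (pvSigWords t))
      ↔ (w ∈ pvSigWords t ∧ ∀ t' ∈ rest, w ∈ pvSigWords t') := by
    intro w
    rw [pv_inter_mem]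
    simp
  have hperm : ((rest.map pvSigWords).foldl (fun acc s => PySem.Set.inter acc s) (pvSigWords t)).Perm
      (df.keys.filter (fun k => (fun c => c == ((texts.length : Nat) : Int)) (df.getD k 0))) := by
    refine (List.perm_ext_iff_of_nodup ?_ ?_).mpr ?_
    · exact pv_inter_nodup _ _ (pv_sig_nodup t)
    · exact hkn.filter _
    · intro w; rw [hI w, hP w]
  exact hperm.length_eq

-- ===== VERDICT (by name: the statement is the Claim_ definition above) =====
theorem detect_coordination_py_spec : Claim_equal_detect_coordination_py := by
  intro texts _
  unfold Spec_detect_coordination_py detect_coordination_py detect_coordination_py_alt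
  by_cases h3 : texts.length < 3
  · simp [h3]
  · cases texts with
    | nil => simp at h3
    | cons t rest =>
      simp only [h3, if_false]
      rw [PySem.List.foldl_append_singleton_eq_map]
      simp only [List.nil_append, List.map_cons]
      rw [pv_len_eq t rest]
      set m := ((((t :: rest).foldl
            (fun d text => (pvSigWords text).foldl (fun d w => d.insert w (d.getD w 0 + 1)) d)
            PySem.Dict.empty).values.filter
          (fun c => c == (((t :: rest).length : Nat) : Int))).length)
      by_cases hm : 3 < m
      · simp [hm]
      · simp [hm]
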